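-- pv_equiv track=rewrite | github.com/uchiha-vivek-web/2025-DSA | neetcode/binary-search/isPerfectSquare.py | ValidPerfectSquareBinarySearch
-- ===== SOURCE A (Python) =====
-- def ValidPerfectSquareBinarySearch(num:int):
--     # Time complexity : O(logN)
--     l,r = 1, num
--     while l<=r :
--         mid = (l+r)//2
--         if mid*mid > num :
--             r=mid-1
--         elif mid*mid < num:
--             l=mid+1
--         else:
--             return True
--     return False
-- ===== SOURCE B (Python) =====
-- def ValidPerfectSquareBinarySearch(num: int):
--     # Sum-of-odd-numbers identity: n is a perfect square iff subtracting
--     # 1, 3, 5, ... from it reaches exactly 0.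
--     if num < 1:
--         return False
--     remaining = num
--     odd = 1
--     while remaining > 0:
--         remaining -= odd
--         odd += 2
--     return remaining == 0
-- ===== Notes on version B (the rewrite author's own statement) =====
-- stated objective: alternative
-- what changed: Replaces the halving binary search over [1,num] with a linear scan subtracting successive odd numbers (sum-of-odds identity), guarding num < 1.
import Mathlib
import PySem

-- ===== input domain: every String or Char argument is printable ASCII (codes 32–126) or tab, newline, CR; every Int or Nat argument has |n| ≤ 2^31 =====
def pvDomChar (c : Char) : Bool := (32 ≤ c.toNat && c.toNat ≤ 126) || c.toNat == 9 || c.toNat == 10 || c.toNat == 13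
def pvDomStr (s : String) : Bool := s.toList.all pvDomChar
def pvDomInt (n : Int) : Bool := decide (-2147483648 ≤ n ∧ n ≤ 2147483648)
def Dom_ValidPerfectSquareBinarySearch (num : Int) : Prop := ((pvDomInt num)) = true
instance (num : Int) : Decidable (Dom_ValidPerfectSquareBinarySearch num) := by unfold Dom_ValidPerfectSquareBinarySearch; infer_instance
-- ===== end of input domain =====

-- B replaces A's binary search over [1, num] with a linear scan subtracting
-- successive odd numbers (sum-of-odds identity); alternative decomposition, not faster.

-- ===== PORT A =====
-- the while loop of A, on state (l, r); mid = (l+r)//2 is inlined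
def pvLoopA (num l r : Int) : Bool :=
  if h : l ≤ r then
    if PySem.Int.floordiv (l + r) 2 * PySem.Int.floordiv (l + r) 2 > num then
      pvLoopA num l (PySem.Int.floordiv (l + r) 2 - 1)
    else if PySem.Int.floordiv (l + r) 2 * PySem.Int.floordiv (l + r) 2 < num then
      pvLoopA num (PySem.Int.floordiv (l + r) 2 + 1) r
    else true
  else false
termination_by (r - l + 1).toNat
decreasing_by
  · have := PySem.Int.floordiv_two_mid_bounds (lo := l) (hi := r) h
    omega
  · have := PySem.Int.floordiv_two_mid_bounds (lo := l) (hi := r) h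
    omega

def ValidPerfectSquareBinarySearch (num : Int) : Bool := pvLoopA num 1 num

-- ===== PORT B =====
-- the while loop of B, on state (remaining, odd); the fuel only totalises the
-- loop (it is ≥ the iteration count whenever B's call reaches it)
def pvLoopB (fuel : Nat) (remaining odd : Int) : Bool :=
  match fuel with
  | 0 => remaining == 0
  | f + 1 =>
    if remaining > 0 then pvLoopB f (remaining - odd) (odd + 2)
    else remaining == 0

def ValidPerfectSquareBinarySearch_alt (num : Int) : Bool :=
  if num < 1 then false
  else pvLoopB num.toNat num 1

-- ===== PRECONDITION & SPEC =====
def Spec_ValidPerfectSquareBinarySearch (num : Int) (out : Bool) : Prop := out = ValidPerfectSquareBinarySearch_alt num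
instance (num : Int) (out : Bool) : Decidable (Spec_ValidPerfectSquareBinarySearch num out) := by unfold Spec_ValidPerfectSquareBinarySearch; infer_instance

-- ===== CLAIM (what is proved, stated in full; the proofs are below) =====
def Claim_equal_ValidPerfectSquareBinarySearch : Prop := ∀ (num : Int), Dom_ValidPerfectSquareBinarySearch num → Spec_ValidPerfectSquareBinarySearch num (ValidPerfectSquareBinarySearch num)

-- ===== LEMMAS AND PROOFS =====

-- A's loop finds a square root in [l, r] iff there is one
lemma pvLoopA_char (num : Int) (n : Nat) (l r : Int) (hn : (r - l + 1).toNat ≤ n) (hl : 1 ≤ l) :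
    pvLoopA num l r = true ↔ ∃ m : Int, l ≤ m ∧ m ≤ r ∧ m * m = num := by
  induction n generalizing l r with
  | zero =>
    have h : ¬ l ≤ r := by omega
    rw [pvLoopA, dif_neg h]
    simp only [Bool.false_eq_true, false_iff]
    rintro ⟨m, h1, h2, _⟩; omega
  | succ n ih =>
    rw [pvLoopA]
    by_cases h : l ≤ r
    · rw [dif_pos h]
      set mid := PySem.Int.floordiv (l + r) 2 with hmid
      have hb := PySem.Int.floordiv_two_mid_bounds (lo := l) (hi := r) h
      rw [← hmid] at hb
      by_cases hgt : mid * mid > num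
      · rw [if_pos hgt, ih l (mid - 1) (by omega) hl]
        constructor
        · rintro ⟨m, h1, h2, h3⟩; exact ⟨m, h1, by omega, h3⟩
        · rintro ⟨m, h1, h2, h3⟩
          refine ⟨m, h1, ?_, h3⟩
          by_contra hc
          have : mid * mid ≤ m * m := mul_self_le_mul_self (by omega) (by omega)
          omega
      · rw [if_neg hgt]
        by_cases hlt : mid * mid < num
        · rw [if_pos hlt, ih (mid + 1) r (by omega) (by omega)]
          constructor
          · rintro ⟨m, h1, h2, h3⟩; exact ⟨m, by omega, h2, h3⟩
          · rintro ⟨m, h1, h2, h3⟩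
            refine ⟨m, ?_, h2, h3⟩
            by_contra hc
            have : m * m ≤ mid * mid := mul_self_le_mul_self (by omega) (by omega)
            omega
        · rw [if_neg hlt]
          simp only [true_iff]
          exact ⟨mid, hb.1, hb.2, by omega⟩
    · rw [dif_neg h]
      simp only [Bool.false_eq_true, false_iff]
      rintro ⟨m, h1, h2, _⟩; omega

-- B's loop, started at remaining = num - k*k, odd = 2k+1 with enough fuel,
-- answers whether num is a square of some m ≥ k
lemma pvLoopB_char (fuel : Nat) (num k : Int) (hk : 0 ≤ k)
    (hf : num - k * k ≤ (fuel : Int)) :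
    pvLoopB fuel (num - k * k) (2 * k + 1) = true ↔ ∃ m : Int, k ≤ m ∧ m * m = num := by
  induction fuel generalizing k with
  | zero =>
    simp only [pvLoopB, beq_iff_eq]
    constructor
    · intro h; exact ⟨k, le_refl k, by omega⟩
    · rintro ⟨m, h1, h2⟩
      have : k * k ≤ m * m := mul_self_le_mul_self hk h1
      omega
  | succ f ih =>
    rw [pvLoopB]
    by_cases hpos : num - k * k > 0
    · rw [if_pos hpos]
      have heq : num - k * k - (2 * k + 1) = num - (k + 1) * (k + 1) := by ring
      have hodd : 2 * k + 1 + 2 = 2 * (k + 1) + 1 := by ring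
      have hexp : (k + 1) * (k + 1) = k * k + 2 * k + 1 := by ring
      rw [heq, hodd, ih (k + 1) (by omega) (by rw [hexp]; push_cast at hf ⊢; omega)]
      constructor
      · rintro ⟨m, h1, h2⟩; exact ⟨m, by omega, h2⟩
      · rintro ⟨m, h1, h2⟩
        refine ⟨m, ?_, h2⟩
        by_contra hc
        have hmk : m = k := by omega
        rw [hmk] at h2; omega
    · rw [if_neg hpos]
      simp only [beq_iff_eq]
      constructor
      · intro h; exact ⟨k, le_refl k, by omega⟩
      · rintro ⟨m, h1, h2⟩
        have : k * k ≤ m * m := mul_self_le_mul_self hk h1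
        omega

-- ===== VERDICT (by name: the statement is the Claim_ definition above) =====
theorem ValidPerfectSquareBinarySearch_spec : Claim_equal_ValidPerfectSquareBinarySearch := by
  intro num _
  unfold Spec_ValidPerfectSquareBinarySearch ValidPerfectSquareBinarySearch
    ValidPerfectSquareBinarySearch_alt
  by_cases hneg : num < 1
  · rw [if_pos hneg, pvLoopA]
    simp only [show ¬ (1 : Int) ≤ num by omega, dite_false]
  · rw [if_neg hneg]
    have hA := pvLoopA_char num (num - 1 + 1).toNat 1 num (by omega) (le_refl 1)
    have hB := pvLoopB_char num.toNat num 0 (le_refl 0) (by omega)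
    simp only [mul_zero, sub_zero, mul_zero, zero_add] at hB
    have : pvLoopA num 1 num = pvLoopB num.toNat num 1 := by
      rw [Bool.eq_iff_iff, hA, hB]
      constructor
      · rintro ⟨m, h1, _, h3⟩; exact ⟨m, by omega, h3⟩
      · rintro ⟨m, h1, h2⟩
        have hm1 : 1 ≤ m := by
          by_cases h : 1 ≤ m
          · exact h
          · have hm0 : m = 0 := by omega
            rw [hm0] at h2; omega
        refine ⟨m, hm1, ?_, h2⟩
        nlinarith
    exact this
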